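-- pv_equiv track=rewrite | github.com/leculver/AdventOfCode | 2024/17_chronospatial_computer/solution.py | available_numbers
-- ===== SOURCE A (Python) =====
-- def simulate_program(a, c):
--     # bst 4
--     b = a & 7
--
--     # bxl 5
--     b ^= 5
--
--     # bxl 6
--     b ^= 6
--
--     # bxc
--     b ^= c
--
--     return b & 7
--
-- def available_numbers(target):
--     result = set()
--
--     for a in range(0, 8):
--         for c in range(0, 8):
--             shift = a ^ 5           # bxl 5
--             if simulate_program(a, c) == target:
--                 result.add(a | (c << shift))
--
--     return result
-- ===== SOURCE B (Python) =====
-- def available_numbers(target):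
--     # Closed form: simulate_program(a, c) = (a ^ 3 ^ c) & 7, so for a target in
--     # 0..7 the unique matching c for each a is c = a ^ 3 ^ target.
--     if target not in range(8):
--         return set()
--     t = int(target)
--     return {a | ((a ^ 3 ^ t) << (a ^ 5)) for a in range(8)}
-- ===== Notes on version B (the rewrite author's own statement) =====
-- stated objective: alternative
-- what changed: B inverts the bit relation simulate(a,c) = (a ^ 3 ^ c) & 7, so for each a it computes the unique matching c = a ^ 3 ^ target directly, replacing A's scan over all 64 (a,c) pairs (empty set when target is outside 0..7).
import Mathlib
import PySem

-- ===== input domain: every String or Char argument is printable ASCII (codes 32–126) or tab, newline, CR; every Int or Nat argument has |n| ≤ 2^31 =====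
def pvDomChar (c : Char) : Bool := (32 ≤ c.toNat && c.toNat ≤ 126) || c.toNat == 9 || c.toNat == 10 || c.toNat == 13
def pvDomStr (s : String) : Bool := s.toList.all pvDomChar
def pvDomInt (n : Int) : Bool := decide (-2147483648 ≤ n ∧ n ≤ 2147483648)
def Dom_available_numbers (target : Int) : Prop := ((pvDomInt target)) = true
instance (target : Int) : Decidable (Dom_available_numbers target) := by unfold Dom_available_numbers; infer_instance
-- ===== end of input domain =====

-- B solves the inner relation c = a ^ 3 ^ target directly instead of scanning all 64 (a, c) pairs (alternative; not measurably faster).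

-- ===== PORT A =====
def simulate_program (a c : Int) : Int :=
  -- bst 4
  let b := PySem.Int.band a 7
  -- bxl 5
  let b := PySem.Int.bxor b 5
  -- bxl 6
  let b := PySem.Int.bxor b 6
  -- bxc
  let b := PySem.Int.bxor b c
  PySem.Int.band b 7

def available_numbers (target : Int) : List Int :=
  (PySem.List.pyRange 0 8 1).foldl (fun result a =>
    (PySem.List.pyRange 0 8 1).foldl (fun result c =>
      let shift := PySem.Int.bxor a 5           -- bxl 5
      if simulate_program a c = target then
        PySem.Set.add result (PySem.Int.bor a (c <<< shift.toNat))
      else result) result) PySem.Set.empty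

-- ===== PORT B =====
def available_numbers_alt (target : Int) : List Int :=
  if 0 ≤ target ∧ target ≤ 7 then
    (PySem.List.pyRange 0 8 1).foldl (fun result a =>
      let c := PySem.Int.bxor (PySem.Int.bxor a 3) target
      PySem.Set.add result (PySem.Int.bor a (c <<< (PySem.Int.bxor a 5).toNat)))
      PySem.Set.empty
  else PySem.Set.empty

-- ===== PRECONDITION & SPEC =====
def Spec_available_numbers (target : Int) (out : List Int) : Prop := out = available_numbers_alt target
instance (target : Int) (out : List Int) : Decidable (Spec_available_numbers target out) := by unfold Spec_available_numbers; infer_instance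

-- ===== CLAIM (what is proved, stated in full; the proofs are below) =====
def Claim_equal_available_numbers : Prop := ∀ (target : Int), Dom_available_numbers target → Spec_available_numbers target (available_numbers target)

-- ===== LEMMAS AND PROOFS =====

-- simulate_program always lands in 0..7 (it ends with & 7), checked on the 64 pairs the loops visit
lemma sim_bounds (a c : Int) (ha0 : 0 ≤ a) (ha : a < 8) (hc0 : 0 ≤ c) (hc : c < 8) :
    0 ≤ simulate_program a c ∧ simulate_program a c < 8 := by
  interval_cases a <;> interval_cases c <;> decide

-- with target outside 0..7, the inner loop never fires
lemma inner_nofire (target a : Int) (ht : ¬ (0 ≤ target ∧ target ≤ 7))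
    (ha0 : 0 ≤ a) (ha : a < 8) :
    ∀ (l : List Int) (init : List Int), (∀ c ∈ l, 0 ≤ c ∧ c < 8) →
      (l.foldl (fun result c =>
        let shift := PySem.Int.bxor a 5
        if simulate_program a c = target then
          PySem.Set.add result (PySem.Int.bor a (c <<< shift.toNat))
        else result) init) = init := by
  intro l
  induction l with
  | nil => intro init _; rfl
  | cons c l ih =>
    intro init h
    have hc := h c (by simp)
    have hs := sim_bounds a c ha0 ha hc.1 hc.2
    simp only [List.foldl_cons]
    rw [if_neg (by omega)]
    exact ih init (fun x hx => h x (by simp [hx]))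

lemma outer_nofire (target : Int) (ht : ¬ (0 ≤ target ∧ target ≤ 7)) :
    ∀ (l : List Int) (init : List Int), (∀ a ∈ l, 0 ≤ a ∧ a < 8) →
      (l.foldl (fun result a =>
        (PySem.List.pyRange 0 8 1).foldl (fun result c =>
          let shift := PySem.Int.bxor a 5
          if simulate_program a c = target then
            PySem.Set.add result (PySem.Int.bor a (c <<< shift.toNat))
          else result) result) init) = init := by
  intro l
  induction l with
  | nil => intro init _; rfl
  | cons a l ih =>
    intro init h
    have ha := h a (by simp)
    simp only [List.foldl_cons]
    rw [inner_nofire target a ht ha.1 ha.2 _ init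
        (fun c hc => by
          have := (PySem.List.mem_pyRange_one (a := 0) (b := 8)).mp hc
          omega)]
    exact ih init (fun x hx => h x (by simp [hx]))

-- ===== VERDICT (by name: the statement is the Claim_ definition above) =====
theorem available_numbers_spec : Claim_equal_available_numbers := by
  intro target _
  unfold Spec_available_numbers
  by_cases h : 0 ≤ target ∧ target ≤ 7
  · obtain ⟨h1, h2⟩ := h
    interval_cases target <;> decide
  · unfold available_numbers available_numbers_alt
    rw [if_neg h]
    exact outer_nofire target h _ _ (fun a ha => by
      have := (PySem.List.mem_pyRange_one (a := 0) (b := 8)).mp ha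
      omega)
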